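-- pv_equiv track=rewrite | github.com/nialov/fractopo | fractopo/general.py | flatten_tuples
-- ===== SOURCE A (Python) =====
-- from bisect import bisect
-- from itertools import accumulate, chain, compress, zip_longest
-- from typing import Any, Callable, Dict, List, Sequence, Set, Tuple, Union, overload
--
-- def flatten_tuples(
--     list_of_tuples: List[Tuple[Any, ...]],
-- ) -> Tuple[List[int], List[Any]]:
--     """
--     Flatten collection of tuples and return index references.
--
--     Indexes are from original tuple groupings.
--
--     E.g.
--
--     >>> tuples = [(1, 1, 1), (2, 2, 2, 2), (3,)]
--     >>> flatten_tuples(tuples)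
--     ([0, 0, 0, 1, 1, 1, 1, 2], [1, 1, 1, 2, 2, 2, 2, 3])
--
--     """
--     accumulated_idxs = list(
--         accumulate([len(val_tuple) for _, val_tuple in enumerate(list_of_tuples)])
--     )
--     flattened_tuples = list(chain(*list_of_tuples))
--     flattened_idx_reference = [
--         bisect(accumulated_idxs, idx) for idx in range(len(flattened_tuples))
--     ]
--     return flattened_idx_reference, flattened_tuples
-- ===== SOURCE B (Python) =====
-- def flatten_tuples(list_of_tuples):
--     """Single pass: emit each tuple's origin index per element while extending."""
--     idx_reference = []
--     flattened = []
--     for i, tup in enumerate(list_of_tuples):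
--         idx_reference.extend([i] * len(tup))
--         flattened.extend(tup)
--     return idx_reference, flattened
-- ===== Notes on version B (the rewrite author's own statement) =====
-- stated objective: faster
-- what changed: Replaces prefix-sum accumulation plus a bisect binary search per flattened element with a single pass that emits each tuple's index per element while extending the flattened list.
import Mathlib
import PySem

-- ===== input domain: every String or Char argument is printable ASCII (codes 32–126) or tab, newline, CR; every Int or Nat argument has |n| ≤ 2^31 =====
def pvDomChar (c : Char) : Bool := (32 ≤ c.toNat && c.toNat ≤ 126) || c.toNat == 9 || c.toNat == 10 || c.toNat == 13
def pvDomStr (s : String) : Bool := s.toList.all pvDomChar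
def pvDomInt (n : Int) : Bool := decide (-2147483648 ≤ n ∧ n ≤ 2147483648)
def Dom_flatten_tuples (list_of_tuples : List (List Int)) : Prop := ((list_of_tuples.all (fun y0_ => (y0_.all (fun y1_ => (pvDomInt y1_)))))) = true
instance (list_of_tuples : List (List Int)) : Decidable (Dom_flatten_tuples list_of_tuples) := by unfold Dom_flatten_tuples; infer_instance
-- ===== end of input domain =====

-- B replaces A's prefix-sum + per-element bisect with a single pass emitting each
-- tuple's index per element (objective: faster, asymptotically O(N) vs O(N log M)).

-- ===== PORT A =====
-- itertools.accumulate on an Int list (running sum, no initial element)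
def pvAccumulate (ns : List Int) (run : Int) : List Int :=
  match ns with
  | [] => []
  | n :: rest => (run + n) :: pvAccumulate rest (run + n)

def flatten_tuples (list_of_tuples : List (List Int)) : List Int × List Int :=
  let accumulated_idxs : List Int :=
    pvAccumulate ((PySem.List.enumerate list_of_tuples).map (fun p => (p.2.length : Int))) 0
  let flattened_tuples : List Int := list_of_tuples.flatten
  let flattened_idx_reference : List Int :=
    (PySem.List.pyRange 0 (flattened_tuples.length : Int) 1).map
      (fun idx => (PySem.List.bisectRight accumulated_idxs idx : Int))
  (flattened_idx_reference, flattened_tuples)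

-- ===== PORT B =====
def flatten_tuples_alt (list_of_tuples : List (List Int)) : List Int × List Int :=
  (PySem.List.enumerate list_of_tuples).foldl
    (fun (p : List Int × List Int) it =>
      (p.1 ++ List.replicate it.2.length it.1, p.2 ++ it.2))
    ([], [])

-- ===== PRECONDITION & SPEC =====
def Spec_flatten_tuples (list_of_tuples : List (List Int)) (out : List Int × List Int) : Prop := out = flatten_tuples_alt list_of_tuples
instance (list_of_tuples : List (List Int)) (out : List Int × List Int) : Decidable (Spec_flatten_tuples list_of_tuples out) := by unfold Spec_flatten_tuples; infer_instance

-- ===== CLAIM (what is proved, stated in full; the proofs are below) =====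
def Claim_equal_flatten_tuples : Prop := ∀ (list_of_tuples : List (List Int)), Dom_flatten_tuples list_of_tuples → Spec_flatten_tuples list_of_tuples (flatten_tuples list_of_tuples)

-- ===== LEMMAS AND PROOFS =====

-- reference index list: for each tuple of l (starting at index s) its index, once per element
def pvIdxRef (l : List (List Int)) (s : Int) : List Int :=
  match l with
  | [] => []
  | t :: rest => List.replicate t.length s ++ pvIdxRef rest (s + 1)

theorem pvAccumulate_shift (ns : List Int) (r s : Int) :
    pvAccumulate ns (r + s) = (pvAccumulate ns s).map (fun x => r + x) := by
  induction ns generalizing s with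
  | nil => simp [pvAccumulate]
  | cons n rest ih =>
      simp only [pvAccumulate, List.map_cons]
      rw [show r + s + n = r + (s + n) by ring, ih (s + n)]

theorem pvAccumulate_sorted_nonneg (ns : List Int) (s : Int)
    (h : ∀ n ∈ ns, 0 ≤ n) :
    (pvAccumulate ns s).Pairwise (· ≤ ·) ∧ ∀ x ∈ pvAccumulate ns s, s ≤ x := by
  induction ns generalizing s with
  | nil => simp [pvAccumulate]
  | cons n rest ih =>
      have hn : 0 ≤ n := h n (by simp)
      obtain ⟨hp, hb⟩ := ih (s + n) (fun m hm => h m (by simp [hm]))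
      refine ⟨?_, ?_⟩
      · simp only [pvAccumulate, List.pairwise_cons]
        exact ⟨fun x hx => le_trans (by omega) (hb x hx), hp⟩
      · intro x hx
        simp only [pvAccumulate, List.mem_cons] at hx
        rcases hx with rfl | hx
        · omega
        · have := hb x hx; omega

theorem pvBisect_unique (xs : List Int) (x : Int)
    (hs : xs.Pairwise (· ≤ ·)) (k : Nat) (hk : k ≤ xs.length)
    (h1 : ∀ (j : Nat) (hj : j < xs.length), j < k → xs[j] ≤ x)
    (h2 : ∀ (j : Nat) (hj : j < xs.length), k ≤ j → x < xs[j]) :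
    PySem.List.bisectRight xs x = k := by
  obtain ⟨hb, hb1, hb2⟩ := PySem.List.bisectRight_spec xs x hs
  set b := PySem.List.bisectRight xs x with hbdef
  rcases Nat.lt_trichotomy b k with hlt | heq | hgt
  · have hbl : b < xs.length := lt_of_lt_of_le hlt hk
    have := h1 b hbl hlt
    have := hb2 b hbl (le_refl b)
    omega
  · exact heq
  · have hkl : k < xs.length := lt_of_lt_of_le hgt hb
    have := hb1 k hkl hgt
    have := h2 k hkl (le_refl k)
    omega

-- shorthand for A's accumulated prefix sums of the tuple lengths
def pvAcc (l : List (List Int)) : List Int :=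
  pvAccumulate (l.map (fun t => (t.length : Int))) 0

theorem pvAcc_sorted (l : List (List Int)) : (pvAcc l).Pairwise (· ≤ ·) :=
  (pvAccumulate_sorted_nonneg _ 0 (by simp)).1

theorem pvAcc_nonneg (l : List (List Int)) : ∀ x ∈ pvAcc l, 0 ≤ x :=
  (pvAccumulate_sorted_nonneg _ 0 (by simp)).2

theorem pvAcc_cons (t : List Int) (r : List (List Int)) :
    pvAcc (t :: r) = (t.length : Int) :: (pvAcc r).map (fun x => (t.length : Int) + x) := by
  simp only [pvAcc, List.map_cons, pvAccumulate, zero_add]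
  rw [show ((t.length : Int)) = (t.length : Int) + 0 by ring, pvAccumulate_shift]
  simp

theorem pvIdxRef_shift (l : List (List Int)) (s : Int) :
    pvIdxRef l (s + 1) = (pvIdxRef l s).map (fun x => x + 1) := by
  induction l generalizing s with
  | nil => simp [pvIdxRef]
  | cons t r ih =>
      simp only [pvIdxRef, List.map_append, List.map_replicate]
      rw [ih (s + 1)]

-- A's bisect-per-index comprehension equals the reference index list
theorem pvA_eq_ref (l : List (List Int)) :
    (PySem.List.pyRange 0 (l.flatten.length : Int) 1).map
      (fun idx => (PySem.List.bisectRight (pvAcc l) idx : Int)) = pvIdxRef l 0 := by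
  induction l with
  | nil => simp [pvIdxRef]
  | cons t r ih =>
      have L : Int := (t.length : Int)
      have hsplit : PySem.List.pyRange 0 (((t :: r).flatten.length : Int)) 1
          = PySem.List.pyRange 0 (t.length : Int) 1
            ++ PySem.List.pyRange (t.length : Int) ((t :: r).flatten.length : Int) 1 := by
        apply PySem.List.pyRange_one_append
        · exact Int.natCast_nonneg _
        · simp only [List.flatten_cons, List.length_append]
          push_cast; omega
      rw [hsplit, List.map_append]
      have hsorted := pvAcc_sorted (t :: r)
      have hnn := pvAcc_nonneg r
      -- first block: every idx < t.length gives bisect = 0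
      have hfirst : (PySem.List.pyRange 0 (t.length : Int) 1).map
          (fun idx => (PySem.List.bisectRight (pvAcc (t :: r)) idx : Int))
          = List.replicate t.length (0 : Int) := by
        have : ∀ idx ∈ PySem.List.pyRange 0 (t.length : Int) 1,
            (PySem.List.bisectRight (pvAcc (t :: r)) idx : Int) = 0 := by
          intro idx hidx
          rw [PySem.List.mem_pyRange_one] at hidx
          have h0 : PySem.List.bisectRight (pvAcc (t :: r)) idx = 0 := by
            apply pvBisect_unique _ _ hsorted 0 (Nat.zero_le _)
            · intro j hj hlt; omega
            · intro j hj _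
              simp only [pvAcc_cons] at hj ⊢
              match j with
              | 0 => simpa using hidx.2
              | j + 1 =>
                  simp only [List.getElem_cons_succ]
                  have hj2 : j < (pvAcc r).length := by
                    simp only [List.length_cons, List.length_map] at hj; omega
                  simp only [List.getElem_map]
                  have : 0 ≤ (pvAcc r)[j] := hnn _ (List.getElem_mem _)
                  omega
          rw [h0]; simp
        calc (PySem.List.pyRange 0 (t.length : Int) 1).map
              (fun idx => (PySem.List.bisectRight (pvAcc (t :: r)) idx : Int))
            = (PySem.List.pyRange 0 (t.length : Int) 1).map (fun _ => (0 : Int)) :=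
              List.map_congr_left this
          _ = List.replicate t.length (0 : Int) := by
              rw [List.map_const']
              simp [PySem.List.length_pyRange_one]
      -- second block: idx = t.length + k gives bisect = 1 + bisect (pvAcc r) k
      have hsecond : (PySem.List.pyRange (t.length : Int) ((t :: r).flatten.length : Int) 1).map
          (fun idx => (PySem.List.bisectRight (pvAcc (t :: r)) idx : Int))
          = (pvIdxRef r 0).map (fun x => x + 1) := by
        have hlen : (((t :: r).flatten.length : Int) - (t.length : Int)).toNat
            = r.flatten.length := by
          simp only [List.flatten_cons, List.length_append]; push_cast; omega
        rw [PySem.List.pyRange_one]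
        rw [hlen, List.map_map]
        have hstep : ∀ k ∈ List.range r.flatten.length,
            ((fun idx => (PySem.List.bisectRight (pvAcc (t :: r)) idx : Int)) ∘
              fun k : Nat => (t.length : Int) + (k : Int)) k
            = (PySem.List.bisectRight (pvAcc r) (k : Int) : Int) + 1 := by
          intro k hk
          rw [List.mem_range] at hk
          simp only [Function.comp]
          obtain ⟨hb, hb1, hb2⟩ :=
            PySem.List.bisectRight_spec (pvAcc r) (k : Int) (pvAcc_sorted r)
          set b := PySem.List.bisectRight (pvAcc r) (k : Int) with hbdef
          have h1 : PySem.List.bisectRight (pvAcc (t :: r)) ((t.length : Int) + (k : Int))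
              = b + 1 := by
            apply pvBisect_unique _ _ hsorted (b + 1)
            · rw [pvAcc_cons]; simpa using Nat.succ_le_succ hb
            · intro j hj hlt
              simp only [pvAcc_cons] at hj ⊢
              match j with
              | 0 => simp only [List.getElem_cons_zero]; omega
              | j + 1 =>
                  have hj' : j < (pvAcc r).length := by simpa using hj
                  simp only [List.getElem_cons_succ, List.getElem_map]
                  have := hb1 j hj' (Nat.lt_of_succ_lt_succ hlt)
                  omega
            · intro j hj hge
              simp only [pvAcc_cons] at hj ⊢
              match j with
              | 0 => omega
              | j + 1 =>
                  have hj' : j < (pvAcc r).length := by simpa using hj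
                  simp only [List.getElem_cons_succ, List.getElem_map]
                  have := hb2 j hj' (Nat.le_of_succ_le_succ hge)
                  omega
          rw [h1]; push_cast; ring
        rw [List.map_congr_left hstep]
        rw [← ih, PySem.List.pyRange_zero_natCast, List.map_map, List.map_map]
        apply List.map_congr_left
        intro k hk
        simp [Function.comp]
      rw [hfirst, hsecond]
      simp only [pvIdxRef]
      congr 1
      exact (pvIdxRef_shift r 0).symm

-- B's fold over enumerate, with arbitrary start and accumulators
theorem pvB_fold (l : List (List Int)) (s : Int) (a b : List Int) :
    (PySem.List.enumerate l s).foldl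
      (fun (p : List Int × List Int) it =>
        (p.1 ++ List.replicate it.2.length it.1, p.2 ++ it.2)) (a, b)
    = (a ++ pvIdxRef l s, b ++ l.flatten) := by
  induction l generalizing s a b with
  | nil => simp [PySem.List.enumerate_nil, pvIdxRef]
  | cons t r ih =>
      rw [PySem.List.enumerate_cons]
      simp only [List.foldl_cons]
      rw [ih]
      simp [pvIdxRef, List.append_assoc]

-- ===== VERDICT (by name: the statement is the Claim_ definition above) =====
theorem flatten_tuples_spec : Claim_equal_flatten_tuples := by
  intro l _
  unfold Spec_flatten_tuples flatten_tuples flatten_tuples_alt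
  rw [pvB_fold l 0 [] []]
  simp only [List.nil_append]
  have hmap : (PySem.List.enumerate l).map (fun p => (p.2.length : Int))
      = l.map (fun t => (t.length : Int)) := by
    rw [show (fun p : Int × List Int => (p.2.length : Int))
        = (fun t : List Int => (t.length : Int)) ∘ (fun p : Int × List Int => p.2) from rfl,
      ← List.map_map, PySem.List.map_snd_enumerate]
  rw [hmap]
  rw [show pvAccumulate (l.map (fun t => (t.length : Int))) 0 = pvAcc l from rfl]
  rw [pvA_eq_ref l]
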